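-- pv_equiv track=rewrite | github.com/SageSELab/UI-Bug-Localization-Study | Unixcoder/prevScripts/unixcoderBR.py | rank_files
-- ===== SOURCE A (Python) =====
-- def rank_files(sorted_similarity_scores, original_buggy_locations):
-- 	ranks = []
-- 	unique_file_names = set()
-- 	for bug_location in original_buggy_locations["bug_location"]:
-- 		buggy_file = bug_location["file_name"]
-- 		if buggy_file not in unique_file_names:
-- 			unique_file_names.add(buggy_file)
-- 			order_number = 1
-- 			for key in sorted_similarity_scores:
-- 				if buggy_file in key:
-- 					ranks.append(order_number)
-- 					break
-- 				order_number += 1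
-- 	ranks.sort()
-- 	return ranks
-- ===== SOURCE B (Python) =====
-- def rank_files(sorted_similarity_scores, original_buggy_locations):
--     files = list(dict.fromkeys(loc["file_name"] for loc in original_buggy_locations["bug_location"]))
--     rank_of = {}
--     for i, key in enumerate(sorted_similarity_scores):
--         for f in files:
--             if f not in rank_of and f in key:
--                 rank_of[f] = i + 1
--     return sorted(rank_of.values())
-- ===== Notes on version B (the rewrite author's own statement) =====
-- stated objective: alternative
-- what changed: Inverts the loop nest: instead of scanning the score list per unique file with a manual counter and break, B dedups the file names once, then makes one enumerate pass over the score list building a dict file->first 1-based matching index, and returns its sorted values.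
import Mathlib
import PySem

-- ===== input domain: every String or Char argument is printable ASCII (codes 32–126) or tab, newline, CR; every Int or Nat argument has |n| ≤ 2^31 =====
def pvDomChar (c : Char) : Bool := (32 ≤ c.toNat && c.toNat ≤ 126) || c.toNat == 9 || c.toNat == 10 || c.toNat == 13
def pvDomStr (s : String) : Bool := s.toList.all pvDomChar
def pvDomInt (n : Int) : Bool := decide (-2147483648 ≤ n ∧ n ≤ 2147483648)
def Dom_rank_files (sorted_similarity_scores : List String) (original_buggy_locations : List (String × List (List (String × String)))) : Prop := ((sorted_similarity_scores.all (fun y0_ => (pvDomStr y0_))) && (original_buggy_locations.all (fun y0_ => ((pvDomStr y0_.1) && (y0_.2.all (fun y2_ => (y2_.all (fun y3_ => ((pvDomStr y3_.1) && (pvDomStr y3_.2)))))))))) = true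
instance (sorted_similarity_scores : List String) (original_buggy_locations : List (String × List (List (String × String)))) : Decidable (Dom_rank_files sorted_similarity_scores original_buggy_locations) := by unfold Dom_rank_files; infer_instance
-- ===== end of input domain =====

-- B inverts the loop nest (one enumerate pass over the scores building a dict file -> first matching
-- 1-based index, then sorted values) instead of A's per-file scan with break; same cost, alternative shape.

-- ===== PORT A =====
-- inner 'for key in sorted_similarity_scores: … break' loop of A, with the running order_number
def rankA_inner (buggy_file : String) (keys : List String) (order_number : Int) : Option Int :=
  match keys with
  | [] => none
  | key :: rest =>
    if PySem.Str.isIn buggy_file key then some order_number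
    else rankA_inner buggy_file rest (order_number + 1)

def rank_files (sorted_similarity_scores : List String) (original_buggy_locations : List (String × List (List (String × String)))) : List Int :=
  -- original_buggy_locations["bug_location"]: first-match lookup; Pre_ excludes the KeyError case
  let locs := (List.lookup "bug_location" original_buggy_locations).getD []
  let st := locs.foldl (fun (st : List Int × PySem.Set String) bug_location =>
    let buggy_file := (List.lookup "file_name" bug_location).getD ""
    if PySem.Set.contains st.2 buggy_file then st
    else
      match rankA_inner buggy_file sorted_similarity_scores 1 with
      | some r => (st.1 ++ [r], PySem.Set.add st.2 buggy_file)
      | none   => (st.1, PySem.Set.add st.2 buggy_file)) ([], PySem.Set.empty)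
  PySem.List.sorted st.1 (fun x => x) false

-- ===== PORT B =====
def rank_files_alt (sorted_similarity_scores : List String) (original_buggy_locations : List (String × List (List (String × String)))) : List Int :=
  let files := PySem.List.dedup (((List.lookup "bug_location" original_buggy_locations).getD []).map
      (fun loc => (List.lookup "file_name" loc).getD ""))
  let rank_of := (PySem.List.enumerate sorted_similarity_scores).foldl
    (fun (d : PySem.Dict String Int) ik =>
      files.foldl (fun d f =>
        if !(PySem.Dict.contains d f) && PySem.Str.isIn f ik.2 then PySem.Dict.insert d f (ik.1 + 1) else d) d)
    PySem.Dict.empty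
  PySem.List.sorted (PySem.Dict.values rank_of) (fun x => x) false

-- ===== PRECONDITION & SPEC =====
-- Pre_ excludes exactly the inputs where the Python raises KeyError: a missing "bug_location"
-- key, or a bug location without a "file_name" key.
def Pre_rank_files (sorted_similarity_scores : List String) (original_buggy_locations : List (String × List (List (String × String)))) : Prop :=
  (List.lookup "bug_location" original_buggy_locations).isSome = true ∧
  ∀ loc ∈ (List.lookup "bug_location" original_buggy_locations).getD [],
    (List.lookup "file_name" loc).isSome = true
instance (sorted_similarity_scores : List String) (original_buggy_locations : List (String × List (List (String × String)))) : Decidable (Pre_rank_files sorted_similarity_scores original_buggy_locations) := by unfold Pre_rank_files; infer_instance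

def pvWitness_rank_files : List String × (List (String × List (List (String × String)))) :=
  (["axy", "b"], [("bug_location", [[("file_name", "a")], [("file_name", "b")]])])

def Spec_rank_files (sorted_similarity_scores : List String) (original_buggy_locations : List (String × List (List (String × String)))) (out : List Int) : Prop := out = rank_files_alt sorted_similarity_scores original_buggy_locations
instance (sorted_similarity_scores : List String) (original_buggy_locations : List (String × List (List (String × String)))) (out : List Int) : Decidable (Spec_rank_files sorted_similarity_scores original_buggy_locations out) := by unfold Spec_rank_files; infer_instance

-- ===== CLAIM (what is proved, stated in full; the proofs are below) =====
def Claim_equal_rank_files : Prop := ∀ (sorted_similarity_scores : List String) (original_buggy_locations : List (String × List (List (String × String)))), Dom_rank_files sorted_similarity_scores original_buggy_locations → Pre_rank_files sorted_similarity_scores original_buggy_locations → Spec_rank_files sorted_similarity_scores original_buggy_locations (rank_files sorted_similarity_scores original_buggy_locations)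

-- ===== LEMMAS AND PROOFS =====

-- the fresh file names a pass over gs appends to the seen-set s, in order
def newFiles (s : PySem.Set String) : List String → List String
  | [] => []
  | g :: gs => if PySem.Set.contains s g then newFiles s gs else g :: newFiles (PySem.Set.add s g) gs

theorem nf_fold (gs : List String) : ∀ s : PySem.Set String,
    gs.foldl PySem.Set.add s = s ++ newFiles s gs := by
  induction gs with
  | nil => intro s; simp [newFiles]
  | cons g gs ih =>
    intro s
    by_cases h : PySem.Set.contains s g
    · have hm : g ∈ s := (PySem.Set.contains_iff s g).mp h
      simp [newFiles, h, List.foldl_cons, PySem.Set.add, hm, ih]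
    · have hm : ¬ g ∈ s := fun hx => h ((PySem.Set.contains_iff s g).mpr hx)
      simp [newFiles, h, List.foldl_cons, PySem.Set.add, hm, ih (s ++ [g])]

-- A's accumulator: ranks collected = previous ranks ++ first-match ranks of the fresh files
theorem foldA_fst (keys : List String) (gs : List String) : ∀ (r : List Int) (s : PySem.Set String),
    (gs.foldl (fun (st : List Int × PySem.Set String) g =>
      if PySem.Set.contains st.2 g then st
      else
        match rankA_inner g keys 1 with
        | some v => (st.1 ++ [v], PySem.Set.add st.2 g)
        | none   => (st.1, PySem.Set.add st.2 g)) (r, s)).1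
      = r ++ (newFiles s gs).filterMap (fun g => rankA_inner g keys 1) := by
  induction gs with
  | nil => intro r s; simp [newFiles]
  | cons g gs ih =>
    intro r s
    by_cases h : g ∈ s
    · simp only [newFiles, PySem.Set.contains_iff, h, if_true, List.foldl_cons, if_pos]
      simpa only [PySem.Set.contains_iff] using ih r s
    · cases hr : rankA_inner g keys 1 with
      | none =>
        simp only [newFiles, PySem.Set.contains_iff, h, if_false, List.foldl_cons, hr]
        simpa [hr] using ih r (s.add g)
      | some v =>
        simp only [newFiles, PySem.Set.contains_iff, h, if_false, List.foldl_cons, hr]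
        simpa [hr] using ih (r ++ [v]) (s.add g)

-- rankA_inner as a find? over the enumerated keys
theorem rankA_inner_eq_find (f : String) (keys : List String) : ∀ n : Int,
    rankA_inner f keys (n + 1)
      = ((PySem.List.enumerate keys n).find? (fun ik => PySem.Str.isIn f ik.2)).map (fun ik => ik.1 + 1) := by
  induction keys with
  | nil => intro n; simp [rankA_inner, PySem.List.enumerate_nil]
  | cons k rest ih =>
    intro n
    simp only [rankA_inner, PySem.List.enumerate_cons, List.find?_cons, PySem.Str.isIn_eq]
    by_cases h : PySem.Chars.isIn f.toList k.toList
    · simp [h]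
    · simp only [h, if_false, Bool.false_eq_true, decide_eq_true_eq, cond_false]
      simpa using ih (n + 1)

-- one key processed: what the inner fold over the file list does to a lookup
theorem innerB_get? (i : Int) (k : String) (fs : List String) : ∀ (d : PySem.Dict String Int) (g : String),
    PySem.Dict.get? (fs.foldl (fun d f =>
        if !(PySem.Dict.contains d f) && PySem.Str.isIn f k then PySem.Dict.insert d f (i + 1) else d) d) g
      = if g ∈ fs ∧ PySem.Dict.contains d g = false ∧ PySem.Str.isIn g k then some (i + 1)
        else PySem.Dict.get? d g := by
  induction fs with
  | nil => intro d g; simp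
  | cons f fs ih =>
    intro d g
    simp only [List.foldl_cons]
    by_cases hgf : g = f
    · subst hgf
      by_cases hc : PySem.Dict.contains d g
      · rw [if_neg (by simp [hc]), ih d g, if_neg (by simp [hc]), if_neg (by simp [hc])]
      · have hc' : PySem.Dict.contains d g = false := by simpa using hc
        by_cases hik : PySem.Str.isIn g k
        · rw [if_pos (by rw [hc', hik]; rfl), ih (PySem.Dict.insert d g (i + 1)) g,
              if_neg (by simp [PySem.Dict.contains_insert_self]),
              PySem.Dict.get?_insert_self, if_pos ⟨by simp, hc', hik⟩]
        · have hik' : PySem.Str.isIn g k = false := by simpa using hik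
          have hikc : PySem.Chars.isIn g.toList k.toList = false := by simpa using hik'
          rw [if_neg (by simp [hc', hikc]), ih d g, if_neg (by simp [hikc]),
              if_neg (by simp [hikc])]
    · have hmem : g ∈ f :: fs ↔ g ∈ fs := by simp [hgf]
      by_cases hstep : (!(PySem.Dict.contains d f) && PySem.Str.isIn f k) = true
      · rw [if_pos hstep, ih (PySem.Dict.insert d f (i + 1)) g,
            PySem.Dict.get?_insert_of_ne d (i + 1) hgf,
            PySem.Dict.contains_insert]
        simp [hmem, hgf]
      · rw [if_neg hstep, ih d g]
        simp [hmem]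

-- whole pass: final lookup = old lookup, else first matching enumerated key
theorem foldB_get? (fs : List String) (es : List (Int × String)) : ∀ (d : PySem.Dict String Int) (g : String),
    PySem.Dict.get? (es.foldl (fun (d : PySem.Dict String Int) ik =>
        fs.foldl (fun d f =>
          if !(PySem.Dict.contains d f) && PySem.Str.isIn f ik.2 then PySem.Dict.insert d f (ik.1 + 1) else d) d) d) g
      = if g ∈ fs then
          (PySem.Dict.get? d g).or (((es.find? (fun ik => PySem.Str.isIn g ik.2)).map (fun ik => ik.1 + 1)))
        else PySem.Dict.get? d g := by
  induction es with
  | nil => intro d g; by_cases hg : g ∈ fs <;> simp [hg]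
  | cons ik es ih =>
    intro d g
    simp only [List.foldl_cons]
    rw [ih, innerB_get? ik.1 ik.2 fs d g]
    by_cases hg : g ∈ fs
    · by_cases hik : PySem.Str.isIn g ik.2
      · have hikc : PySem.Chars.isIn g.toList ik.2.toList = true := by simpa using hik
        by_cases hc : PySem.Dict.contains d g
        · obtain ⟨w, hw⟩ : ∃ w, PySem.Dict.get? d g = some w := by
            have h2 := PySem.Dict.contains_eq_isSome_get? d g
            rw [hc] at h2
            exact Option.isSome_iff_exists.mp h2.symm
          rw [if_pos hg, if_pos hg, if_neg (by simp [hc]), hw]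
          simp [List.find?_cons, hikc]
        · have hc' : PySem.Dict.contains d g = false := by simpa using hc
          have hn : PySem.Dict.get? d g = none :=
            (PySem.Dict.get?_eq_none_iff_contains d g).mpr hc'
          rw [if_pos hg, if_pos hg, if_pos ⟨hg, hc', hik⟩, hn]
          simp [List.find?_cons, hikc]
      · have hik' : PySem.Str.isIn g ik.2 = false := by simpa using hik
        have hikc : PySem.Chars.isIn g.toList ik.2.toList = false := by simpa using hik'
        rw [if_pos hg, if_pos hg, if_neg (by simp [hikc])]
        simp [List.find?_cons, hikc]
    · rw [if_neg hg, if_neg (by simp [hg]), if_neg hg]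

theorem foldB_nodup_keys (fs : List String) (es : List (Int × String)) (d : PySem.Dict String Int)
    (hd : (PySem.Dict.keys d).Nodup) :
    (PySem.Dict.keys (es.foldl (fun (d : PySem.Dict String Int) ik =>
        fs.foldl (fun d f =>
          if !(PySem.Dict.contains d f) && PySem.Str.isIn f ik.2 then PySem.Dict.insert d f (ik.1 + 1) else d) d) d)).Nodup := by
  induction es generalizing d with
  | nil => exact hd
  | cons ik es ih =>
    simp only [List.foldl_cons]
    apply ih
    clear ih
    induction fs generalizing d with
    | nil => exact hd
    | cons f fs ihf =>
      simp only [List.foldl_cons]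
      apply ihf
      split
      · exact PySem.Dict.nodup_keys_insert d f (ik.1 + 1) hd
      · exact hd

theorem filterMap_pair_map_snd (h : String → Option Int) (fs : List String) :
    (fs.filterMap (fun g => (h g).map (fun v => (g, v)))).map Prod.snd = fs.filterMap h := by
  induction fs with
  | nil => rfl
  | cons f fs ih => cases hf : h f <;> simp [List.filterMap_cons, hf, ih]

theorem filterMap_pair_map_fst (h : String → Option Int) (fs : List String) :
    (fs.filterMap (fun g => (h g).map (fun v => (g, v)))).map Prod.fst
      = fs.filter (fun g => (h g).isSome) := by
  induction fs with
  | nil => rfl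
  | cons f fs ih => cases hf : h f <;> simp [List.filterMap_cons, hf, ih]

theorem mem_filterMap_pair (h : String → Option Int) (fs : List String) (a : String) (b : Int) :
    (a, b) ∈ fs.filterMap (fun g => (h g).map (fun v => (g, v))) ↔ a ∈ fs ∧ h a = some b := by
  simp only [List.mem_filterMap, Option.map_eq_some_iff, Prod.mk.injEq]
  constructor
  · rintro ⟨g, hg, v, hv, rfl, rfl⟩; exact ⟨hg, hv⟩
  · rintro ⟨ha, hb⟩; exact ⟨a, ha, b, hb, rfl, rfl⟩

theorem rank_files_spec : Claim_equal_rank_files := by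
  intro keys o _ _
  unfold Spec_rank_files rank_files rank_files_alt
  set locs := (List.lookup "bug_location" o).getD [] with hlocs
  set gs := locs.map (fun loc => (List.lookup "file_name" loc).getD "") with hgs
  set rnk := fun g => rankA_inner g keys 1 with hrnk
  set fs := newFiles PySem.Set.empty gs with hfs
  -- A's accumulated ranks
  have hA : (locs.foldl (fun (st : List Int × PySem.Set String) bug_location =>
      let buggy_file := (List.lookup "file_name" bug_location).getD ""
      if PySem.Set.contains st.2 buggy_file then st
      else
        match rankA_inner buggy_file keys 1 with
        | some r => (st.1 ++ [r], PySem.Set.add st.2 buggy_file)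
        | none   => (st.1, PySem.Set.add st.2 buggy_file)) ([], PySem.Set.empty)).1
      = fs.filterMap rnk := by
    have h := foldA_fst keys gs [] PySem.Set.empty
    rw [hgs, List.foldl_map] at h
    simpa using h
  -- B's unique file list is the same fresh-file list
  have hfiles : PySem.List.dedup gs = fs := by
    rw [PySem.List.dedup_eq_ofList, PySem.Set.ofList_eq_foldl]
    have h := nf_fold gs PySem.Set.empty
    simpa [PySem.Set.empty] using h
  have nfnd : fs.Nodup := hfiles ▸ PySem.List.nodup_dedup gs
  set es := PySem.List.enumerate keys 0 with hes
  set dstar := es.foldl (fun (d : PySem.Dict String Int) ik =>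
      fs.foldl (fun d f =>
        if !(PySem.Dict.contains d f) && PySem.Str.isIn f ik.2 then PySem.Dict.insert d f (ik.1 + 1) else d) d)
    PySem.Dict.empty with hdstar
  have keysN : (PySem.Dict.keys dstar).Nodup :=
    foldB_nodup_keys fs es PySem.Dict.empty PySem.Dict.nodup_keys_empty
  have hget : ∀ g, PySem.Dict.get? dstar g = if g ∈ fs then rnk g else none := by
    intro g
    rw [hdstar, foldB_get? fs es PySem.Dict.empty g, PySem.Dict.get?_empty]
    by_cases hin : g ∈ fs
    · rw [if_pos hin, if_pos hin, Option.none_or, hes]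
      have h := rankA_inner_eq_find g keys 0
      rw [show (0 : Int) + 1 = 1 by norm_num] at h
      exact h.symm
    · rw [if_neg hin, if_neg hin]
  have itemsN : (PySem.Dict.items dstar).Nodup := by
    apply List.Nodup.of_map (fun p => p.1)
    simpa [PySem.Dict.keys] using keysN
  have Lfst := filterMap_pair_map_fst rnk fs
  have LN : (fs.filterMap (fun g => (rnk g).map (fun v => (g, v)))).Nodup := by
    apply List.Nodup.of_map Prod.fst
    rw [Lfst]
    exact List.Nodup.filter _ nfnd
  have hitems : (PySem.Dict.items dstar).Perm (fs.filterMap (fun g => (rnk g).map (fun v => (g, v)))) := by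
    rw [List.perm_ext_iff_of_nodup itemsN LN]
    rintro ⟨a, b⟩
    rw [mem_filterMap_pair]
    constructor
    · intro hp
      have hgp : PySem.Dict.get? dstar a = some b := PySem.Dict.get?_of_mem_items dstar hp keysN
      rw [hget a] at hgp
      by_cases hin : a ∈ fs
      · rw [if_pos hin] at hgp; exact ⟨hin, hgp⟩
      · rw [if_neg hin] at hgp; cases hgp
    · rintro ⟨hin, hr⟩
      have hgp : PySem.Dict.get? dstar a = some b := by rw [hget a, if_pos hin]; exact hr
      have hcont : PySem.Dict.contains dstar a = true := by
        rw [PySem.Dict.contains_eq_isSome_get?, hgp]; rfl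
      have hk : a ∈ PySem.Dict.keys dstar := (PySem.Dict.contains_iff_mem_keys dstar a).mp hcont
      have hgd : PySem.Dict.getD dstar a 0 = b := PySem.Dict.getD_of_get?_eq_some dstar 0 hgp
      rw [PySem.Dict.items_eq_map_keys dstar keysN 0]
      exact List.mem_map.mpr ⟨a, hk, by rw [hgd]⟩
  have hperm : (fs.filterMap rnk).Perm (PySem.Dict.values dstar) := by
    have h1 : PySem.Dict.values dstar = (PySem.Dict.items dstar).map Prod.snd := rfl
    have h2 := hitems.map Prod.snd
    rw [filterMap_pair_map_snd rnk fs] at h2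
    rw [h1]
    exact h2.symm
  simp only [hA, hfiles]
  exact (PySem.List.sorted_id_eq_sorted_id_iff_perm _ _).mpr hperm
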